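-- pv_equiv track=rewrite | github.com/h4ppyturt1e/randomProjects | notUglyGraceExam.py | assign_colours
-- ===== SOURCE A (Python) =====
-- def assign_colours(message, lower_cols_list, upper_cols_list):
--     msg_len = len(message)
--     while (len(lower_cols_list) < msg_len):
--         lower_cols_list += lower_cols_list
--     while (len(upper_cols_list) < msg_len):
--         upper_cols_list += upper_cols_list
--
--     lower_list = []
--     upper_list = []
--     space_list = []
--     punctuation_list = []
--
--     for i, char in enumerate(message):
--         if char.isupper():
--             upper_list.append((i, char))
--         elif char.islower():
--             lower_list.append((i, char))
--         elif char.isspace():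
--             space_list.append((i, char))
--         else:
--             punctuation_list.append((i, char))
--
--     temp_result = []
--
--     for cur_char, color in zip(lower_list, lower_cols_list):
--         i, char = cur_char[0], cur_char[1]
--         temp_result.append((i, char, color))
--
--     for cur_char, color in zip(upper_list, upper_cols_list):
--         i, char = cur_char[0], cur_char[1]
--         temp_result.append((i, char, color))
--
--     for cur_char in space_list:
--         i, char = cur_char[0], cur_char[1]
--         temp_result.append((i, char, "None"))
--
--     for cur_char in punctuation_list:
--         i, char = cur_char[0], cur_char[1]
--         temp_result.append((i, char, "silver"))
--
--     temp_result.sort()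
--
--     final_result = []
--
--     for _, char, color in temp_result:
--         final_result.append([char, color])
--
--     return final_result
-- ===== SOURCE B (Python) =====
-- def assign_colours(message, lower_cols_list, upper_cols_list):
--     nl = len(lower_cols_list)
--     nu = len(upper_cols_list)
--     l = u = 0
--     result = []
--     for char in message:
--         if char.isupper():
--             result.append([char, upper_cols_list[u % nu]])
--             u += 1
--         elif char.islower():
--             result.append([char, lower_cols_list[l % nl]])
--             l += 1
--         elif char.isspace():
--             result.append([char, "None"])
--         else:
--             result.append([char, "silver"])
--     return result
-- ===== Notes on version B (the rewrite author's own statement) =====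
-- stated objective: faster
-- what changed: Instead of growing the colour lists by repeated doubling, bucketing characters into four category lists, zipping colours onto them and sorting back by index, B makes a single pass over the message with two per-category counters and indexes the colour lists modulo their length, emitting the result directly in original order (O(n) vs O(n log n), no sort, no list growing, and B does not mutate the caller's colour lists as A's '+=' does).
import Mathlib
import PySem

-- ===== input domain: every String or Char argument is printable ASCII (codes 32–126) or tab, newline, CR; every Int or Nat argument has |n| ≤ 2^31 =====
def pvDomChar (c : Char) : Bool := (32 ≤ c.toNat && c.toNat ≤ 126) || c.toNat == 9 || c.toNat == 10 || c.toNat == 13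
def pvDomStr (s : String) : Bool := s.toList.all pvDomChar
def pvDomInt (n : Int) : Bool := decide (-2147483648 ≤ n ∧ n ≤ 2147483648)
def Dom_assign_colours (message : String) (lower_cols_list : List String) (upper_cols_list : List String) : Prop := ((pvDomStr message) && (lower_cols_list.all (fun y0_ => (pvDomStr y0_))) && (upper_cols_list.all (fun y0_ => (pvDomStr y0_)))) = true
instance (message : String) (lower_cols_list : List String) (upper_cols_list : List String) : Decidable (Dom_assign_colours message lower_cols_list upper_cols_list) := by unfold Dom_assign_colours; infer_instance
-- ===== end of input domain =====

-- B replaces A's grow-the-colour-lists + bucket-by-category + sort-by-index pipeline with a single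
-- pass using per-category counters and modulo indexing (objective: faster — one pass, no sort);
-- equivalence is about the RETURN value only: A mutates the caller's colour lists in place ('+='), B does not.


-- ===== PORT A =====
-- 'while len(l) < msg_len: l += l'.  Python loops forever when l == [] and 0 < msg_len; that
-- case is excluded by Pre_ below and the 'if l = []' branch is only a totality guard.
def growA (l : List String) (n : Nat) : List String :=
  if l.length < n then
    if h0 : l = [] then l
    else growA (l ++ l) n
  else l
termination_by n - l.length
decreasing_by
  have : 0 < l.length := List.length_pos_iff.mpr h0
  simp only [List.length_append]; omega

-- 'for i, char in enumerate(message)' — the enumerated character stream (i is a Python int)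
def pyEnumA (i : Int) : List Char → List (Int × Char)
  | [] => []
  | c :: cs => (i, c) :: pyEnumA (i + 1) cs

def assign_colours (message : String) (lower_cols_list : List String) (upper_cols_list : List String) : List (List String) :=
  let msg_len := message.toList.length
  let lower_cols := growA lower_cols_list msg_len
  let upper_cols := growA upper_cols_list msg_len
  -- the category loop: four accumulators, append at the end, branch order as in Python
  let cat := (pyEnumA 0 message.toList).foldl
    (fun st p =>
      if PySem.Chars.isupper p.2 then (st.1, st.2.1 ++ [p], st.2.2.1, st.2.2.2)
      else if PySem.Chars.islower p.2 then (st.1 ++ [p], st.2.1, st.2.2.1, st.2.2.2)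
      else if PySem.Chars.isspace p.2 then (st.1, st.2.1, st.2.2.1 ++ [p], st.2.2.2)
      else (st.1, st.2.1, st.2.2.1, st.2.2.2 ++ [p]))
    (([], [], [], []) : List (Int × Char) × List (Int × Char) × List (Int × Char) × List (Int × Char))
  let lower_list := cat.1
  let upper_list := cat.2.1
  let space_list := cat.2.2.1
  let punctuation_list := cat.2.2.2
  let temp₁ := (lower_list.zip lower_cols).foldl (fun acc x => acc ++ [(x.1.1, x.1.2, x.2)]) []
  let temp₂ := (upper_list.zip upper_cols).foldl (fun acc x => acc ++ [(x.1.1, x.1.2, x.2)]) temp₁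
  let temp₃ := space_list.foldl (fun acc x => acc ++ [(x.1, x.2, "None")]) temp₂
  let temp₄ := punctuation_list.foldl (fun acc x => acc ++ [(x.1, x.2, "silver")]) temp₃
  -- temp_result.sort(): Python sorts the (i, char, colour) triples lexicographically; the
  -- indices i are pairwise distinct (one per message position), so sorting by i alone is exact.
  let sorted_temp := PySem.List.sorted temp₄ (fun t => t.1) false
  sorted_temp.foldl (fun acc t => acc ++ [[String.singleton t.2.1, t.2.2]]) []

-- ===== PORT B =====
-- single pass, counters l (lowercase seen) and u (uppercase seen); colour = list[count % len].
-- 'getD _ ""' is only a totality guard: under Pre_ the indexed list is nonempty.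
def altGo (lcs ucs : List String) (l u : Nat) : List Char → List (List String)
  | [] => []
  | c :: cs =>
    if PySem.Chars.isupper c then
      [String.singleton c, ucs.getD (u % ucs.length) ""] :: altGo lcs ucs l (u + 1) cs
    else if PySem.Chars.islower c then
      [String.singleton c, lcs.getD (l % lcs.length) ""] :: altGo lcs ucs (l + 1) u cs
    else if PySem.Chars.isspace c then
      [String.singleton c, "None"] :: altGo lcs ucs l u cs
    else
      [String.singleton c, "silver"] :: altGo lcs ucs l u cs

def assign_colours_alt (message : String) (lower_cols_list : List String) (upper_cols_list : List String) : List (List String) :=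
  altGo lower_cols_list upper_cols_list 0 0 message.toList

-- ===== PRECONDITION & SPEC =====
-- Pre_ excludes exactly the inputs on which A never returns: a nonempty message with an empty
-- colour list makes A's 'while len(l) < msg_len: l += l' loop forever.
def Pre_assign_colours (message : String) (lower_cols_list : List String) (upper_cols_list : List String) : Prop :=
  message = "" ∨ (lower_cols_list ≠ [] ∧ upper_cols_list ≠ [])
instance (message : String) (lower_cols_list : List String) (upper_cols_list : List String) : Decidable (Pre_assign_colours message lower_cols_list upper_cols_list) := by unfold Pre_assign_colours; infer_instance

def pvWitness_assign_colours : String × List String × List String := ("Ab c!", ["red", "blue"], ["cyan"])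

def Spec_assign_colours (message : String) (lower_cols_list : List String) (upper_cols_list : List String) (out : List (List String)) : Prop := out = assign_colours_alt message lower_cols_list upper_cols_list
instance (message : String) (lower_cols_list : List String) (upper_cols_list : List String) (out : List (List String)) : Decidable (Spec_assign_colours message lower_cols_list upper_cols_list out) := by unfold Spec_assign_colours; infer_instance

-- ===== CLAIM (what is proved, stated in full; the proofs are below) =====
def Claim_equal_assign_colours : Prop := ∀ (message : String) (lower_cols_list : List String) (upper_cols_list : List String), Dom_assign_colours message lower_cols_list upper_cols_list → Pre_assign_colours message lower_cols_list upper_cols_list → Spec_assign_colours message lower_cols_list upper_cols_list (assign_colours message lower_cols_list upper_cols_list)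

-- ===== LEMMAS AND PROOFS =====

-- growA repeats the base list with period l.length out to at least n elements
theorem growA_get (l : List String) (n : Nat) (h0 : l ≠ []) :
    ∀ j, j < n → (growA l n)[j]? = l[j % l.length]? := by
  fun_induction growA l n with
  | case1 h => exact absurd rfl h0
  | case2 l h hne ih =>
    intro j hj
    have hlen : 0 < l.length := List.length_pos_iff.mpr hne
    rw [ih (by simp [hne]) j hj]
    have h2 : (l ++ l).length = l.length + l.length := by simp
    have hdvd : l.length ∣ (l ++ l).length := by rw [h2]; exact ⟨2, by ring⟩
    have hmm : j % (l ++ l).length % l.length = j % l.length := Nat.mod_mod_of_dvd j hdvd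
    have hlt2 : j % (l ++ l).length < (l ++ l).length := Nat.mod_lt _ (by omega)
    by_cases hc : j % (l ++ l).length < l.length
    · rw [List.getElem?_append_left hc, ← hmm, Nat.mod_eq_of_lt hc]
    · push_neg at hc
      rw [List.getElem?_append_right hc]
      congr 1
      have hsub : j % (l ++ l).length % l.length = j % (l ++ l).length - l.length := by
        rw [Nat.mod_eq_sub_mod hc, Nat.mod_eq_of_lt (by omega)]
      omega
  | case3 l h =>
    intro j hj
    have : j < l.length := by omega
    rw [Nat.mod_eq_of_lt this]

-- the four category guards, in A's branch order
def gUp (c : Char) : Bool := PySem.Chars.isupper c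
def gLo (c : Char) : Bool := !PySem.Chars.isupper c && PySem.Chars.islower c
def gSp (c : Char) : Bool := !PySem.Chars.isupper c && !PySem.Chars.islower c && PySem.Chars.isspace c
def gPu (c : Char) : Bool := !PySem.Chars.isupper c && !PySem.Chars.islower c && !PySem.Chars.isspace c

-- the colour-annotated stream both sides compute, with running counters
def trip (lcs ucs : List String) (i : Int) (l u : Nat) : List Char → List (Int × Char × String)
  | [] => []
  | c :: cs =>
    if PySem.Chars.isupper c then
      (i, c, ucs.getD (u % ucs.length) "") :: trip lcs ucs (i + 1) l (u + 1) cs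
    else if PySem.Chars.islower c then
      (i, c, lcs.getD (l % lcs.length) "") :: trip lcs ucs (i + 1) (l + 1) u cs
    else if PySem.Chars.isspace c then
      (i, c, "None") :: trip lcs ucs (i + 1) l u cs
    else
      (i, c, "silver") :: trip lcs ucs (i + 1) l u cs

theorem trip_cons (lcs ucs : List String) (i : Int) (l u : Nat) (c : Char) (cs : List Char) :
    ∃ col l' u', trip lcs ucs i l u (c :: cs) = (i, c, col) :: trip lcs ucs (i + 1) l' u' cs := by
  by_cases h1 : PySem.Chars.isupper c
  · exact ⟨ucs.getD (u % ucs.length) "", l, u + 1, by simp [trip, h1]⟩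
  · by_cases h2 : PySem.Chars.islower c
    · exact ⟨lcs.getD (l % lcs.length) "", l + 1, u, by simp [trip, h1, h2]⟩
    · by_cases h3 : PySem.Chars.isspace c
      · exact ⟨"None", l, u, by simp [trip, h1, h2, h3]⟩
      · exact ⟨"silver", l, u, by simp [trip, h1, h2, h3]⟩

theorem trip_fst_ge (lcs ucs : List String) :
    ∀ (cs : List Char) (i : Int) (l u : Nat) (t : Int × Char × String),
      t ∈ trip lcs ucs i l u cs → i ≤ t.1 := by
  intro cs
  induction cs with
  | nil => intro i l u t ht; simp [trip] at ht
  | cons c cs ih =>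
    intro i l u t ht
    obtain ⟨col, l', u', heq⟩ := trip_cons lcs ucs i l u c cs
    rw [heq] at ht
    rcases List.mem_cons.mp ht with h | h
    · subst h; simp
    · have := ih (i + 1) l' u' t h; omega

theorem trip_pairwise (lcs ucs : List String) :
    ∀ (cs : List Char) (i : Int) (l u : Nat),
      (trip lcs ucs i l u cs).Pairwise (fun a b => a.1 < b.1) := by
  intro cs
  induction cs with
  | nil => intro i l u; simp [trip]
  | cons c cs ih =>
    intro i l u
    obtain ⟨col, l', u', heq⟩ := trip_cons lcs ucs i l u c cs
    rw [heq]
    refine List.Pairwise.cons ?_ (ih (i + 1) l' u')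
    intro t ht
    have := trip_fst_ge lcs ucs cs (i + 1) l' u' t ht
    simp only; omega

theorem altGo_eq_map_trip (lcs ucs : List String) :
    ∀ (cs : List Char) (i : Int) (l u : Nat),
      altGo lcs ucs l u cs = (trip lcs ucs i l u cs).map (fun t => [String.singleton t.2.1, t.2.2]) := by
  intro cs
  induction cs with
  | nil => intro i l u; simp [altGo, trip]
  | cons c cs ih =>
    intro i l u
    unfold altGo trip
    split_ifs <;> simp [ih (i + 1)]

-- A's category fold is the four guarded filters of the enumerated stream
theorem catFold_eq (pairs : List (Int × Char)) :
    ∀ (a b c d : List (Int × Char)),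
      pairs.foldl
        (fun st p =>
          if PySem.Chars.isupper p.2 then (st.1, st.2.1 ++ [p], st.2.2.1, st.2.2.2)
          else if PySem.Chars.islower p.2 then (st.1 ++ [p], st.2.1, st.2.2.1, st.2.2.2)
          else if PySem.Chars.isspace p.2 then (st.1, st.2.1, st.2.2.1 ++ [p], st.2.2.2)
          else (st.1, st.2.1, st.2.2.1, st.2.2.2 ++ [p])) (a, b, c, d)
      = (a ++ pairs.filter (fun p => gLo p.2), b ++ pairs.filter (fun p => gUp p.2),
         c ++ pairs.filter (fun p => gSp p.2), d ++ pairs.filter (fun p => gPu p.2)) := by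
  induction pairs with
  | nil => intro a b c d; simp
  | cons p ps ih =>
    intro a b c d
    simp only [List.foldl_cons]
    by_cases h1 : PySem.Chars.isupper p.2 <;> by_cases h2 : PySem.Chars.islower p.2 <;>
      by_cases h3 : PySem.Chars.isspace p.2 <;>
      simp [h1, h2, h3, ih, gUp, gLo, gSp, gPu, List.filter_cons]

theorem perm4_mid2 {α : Type} (a b c d : List α) (x : α) :
    (a ++ (x :: b) ++ c ++ d).Perm (x :: (a ++ b ++ c ++ d)) := by
  simpa [List.append_assoc] using
    List.perm_middle (a := x) (l₁ := a) (l₂ := b ++ c ++ d)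

theorem perm4_mid3 {α : Type} (a b c d : List α) (x : α) :
    (a ++ b ++ (x :: c) ++ d).Perm (x :: (a ++ b ++ c ++ d)) := by
  simpa [List.append_assoc] using
    List.perm_middle (a := x) (l₁ := a ++ b) (l₂ := c ++ d)

theorem perm4_mid4 {α : Type} (a b c d : List α) (x : α) :
    (a ++ b ++ c ++ (x :: d)).Perm (x :: (a ++ b ++ c ++ d)) := by
  simpa [List.append_assoc] using
    List.perm_middle (a := x) (l₁ := a ++ b ++ c) (l₂ := d)

theorem segments_perm (lcs ucs L U : List String) (n : Nat)
    (hL : ∀ j, j < n → L[j]? = some (lcs.getD (j % lcs.length) ""))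
    (hU : ∀ j, j < n → U[j]? = some (ucs.getD (j % ucs.length) "")) :
    ∀ (cs : List Char) (i : Int) (l u : Nat),
      l + cs.countP gLo ≤ n → u + cs.countP gUp ≤ n →
      List.Perm
        ((((pyEnumA i cs).filter (fun p => gLo p.2)).zip (L.drop l)).map (fun x => (x.1.1, x.1.2, x.2))
          ++ (((pyEnumA i cs).filter (fun p => gUp p.2)).zip (U.drop u)).map (fun x => (x.1.1, x.1.2, x.2))
          ++ ((pyEnumA i cs).filter (fun p => gSp p.2)).map (fun x => (x.1, x.2, "None"))
          ++ ((pyEnumA i cs).filter (fun p => gPu p.2)).map (fun x => (x.1, x.2, "silver")))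
        (trip lcs ucs i l u cs) := by
  intro cs
  induction cs with
  | nil => intro i l u _ _; simp [pyEnumA, trip]
  | cons c cs ih =>
    intro i l u hl hu
    rw [List.countP_cons] at hl hu
    simp only [pyEnumA, List.filter_cons]
    by_cases h1 : PySem.Chars.isupper c
    · -- uppercase: head comes from the second segment
      have eU : gUp c = true := by simp [gUp, h1]
      have eL : gLo c = false := by simp [gLo, h1]
      have eS : gSp c = false := by simp [gSp, h1]
      have eP : gPu c = false := by simp [gPu, h1]
      have hl' : l + List.countP gLo cs ≤ n := by simp [eL] at hl; omega
      have hu' : u + 1 + List.countP gUp cs ≤ n := by simp [eU] at hu; omega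
      have hun : u < n := by omega
      have hU' := hU u hun
      have hulen : u < U.length := by
        cases hge : U[u]? with
        | none => rw [hge] at hU'; cases hU'
        | some v => exact (List.getElem?_eq_some_iff.mp hge).1
      have hval : U[u] = ucs.getD (u % ucs.length) "" := by
        rw [List.getElem?_eq_getElem hulen] at hU'; exact Option.some.inj hU'
      have base := ih (i + 1) l (u + 1) (by omega) (by omega)
      simp only [eU, eL, eS, eP, if_true, if_false, Bool.false_eq_true, ite_true, ite_false,
        trip, h1]
      rw [List.drop_eq_getElem_cons hulen]
      simp only [List.zip_cons_cons, List.map_cons, hval]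
      exact (perm4_mid2 _ _ _ _ _).trans (base.cons _)
    · by_cases h2 : PySem.Chars.islower c
      · -- lowercase: head of the first segment
        have eU : gUp c = false := by simp [gUp, h1]
        have eL : gLo c = true := by simp [gLo, h1, h2]
        have eS : gSp c = false := by simp [gSp, h2]
        have eP : gPu c = false := by simp [gPu, h2]
        have hl' : l + 1 + List.countP gLo cs ≤ n := by simp [eL] at hl; omega
        have hu' : u + List.countP gUp cs ≤ n := by simp [eU] at hu; omega
        have hln : l < n := by omega
        have hL' := hL l hln
        have hllen : l < L.length := by
          cases hge : L[l]? with
          | none => rw [hge] at hL'; cases hL'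
          | some v => exact (List.getElem?_eq_some_iff.mp hge).1
        have hval : L[l] = lcs.getD (l % lcs.length) "" := by
          rw [List.getElem?_eq_getElem hllen] at hL'; exact Option.some.inj hL'
        have base := ih (i + 1) (l + 1) u (by omega) (by omega)
        simp only [eU, eL, eS, eP, if_true, if_false, Bool.false_eq_true, ite_true, ite_false,
          trip, h1, h2]
        rw [List.drop_eq_getElem_cons hllen]
        simp only [List.zip_cons_cons, List.map_cons, hval, List.cons_append]
        exact base.cons _
      · by_cases h3 : PySem.Chars.isspace c
        · -- space: head of the third segment
          have eU : gUp c = false := by simp [gUp, h1]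
          have eL : gLo c = false := by simp [gLo, h1, h2]
          have eS : gSp c = true := by simp [gSp, h1, h2, h3]
          have eP : gPu c = false := by simp [gPu, h3]
          have hl' : l + List.countP gLo cs ≤ n := by simp [eL] at hl; omega
          have hu' : u + List.countP gUp cs ≤ n := by simp [eU] at hu; omega
          have base := ih (i + 1) l u (by omega) (by omega)
          simp only [eU, eL, eS, eP, if_true, if_false, Bool.false_eq_true, ite_true, ite_false,
            trip, h1, h2, h3, List.map_cons]
          exact (perm4_mid3 _ _ _ _ _).trans (base.cons _)
        · -- punctuation: head of the last segment
          have eU : gUp c = false := by simp [gUp, h1]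
          have eL : gLo c = false := by simp [gLo, h1, h2]
          have eS : gSp c = false := by simp [gSp, h3]
          have eP : gPu c = true := by simp [gPu, h1, h2, h3]
          have hl' : l + List.countP gLo cs ≤ n := by simp [eL] at hl; omega
          have hu' : u + List.countP gUp cs ≤ n := by simp [eU] at hu; omega
          have base := ih (i + 1) l u (by omega) (by omega)
          simp only [eU, eL, eS, eP, if_true, if_false, Bool.false_eq_true, ite_true, ite_false,
            trip, h1, h2, h3, List.map_cons]
          exact (perm4_mid4 _ _ _ _ _).trans (base.cons _)

-- ===== VERDICT (by name: the statement is the Claim_ definition above) =====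
theorem assign_colours_spec : Claim_equal_assign_colours := by
  intro message lcs ucs _hdom hpre
  unfold Spec_assign_colours
  rcases hpre with hempty | ⟨hlne, hune⟩
  · subst hempty
    simp [assign_colours, assign_colours_alt, growA, pyEnumA, altGo, PySem.List.sorted]
  · have hlpos : 0 < lcs.length := List.length_pos_iff.mpr hlne
    have hupos : 0 < ucs.length := List.length_pos_iff.mpr hune
    have hL : ∀ j, j < message.toList.length →
        (growA lcs message.toList.length)[j]? = some (lcs.getD (j % lcs.length) "") := by
      intro j hj
      rw [growA_get lcs _ hlne j hj]
      have hm : j % lcs.length < lcs.length := Nat.mod_lt _ hlpos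
      rw [List.getElem?_eq_getElem hm, List.getD_eq_getElem _ _ hm]
    have hU : ∀ j, j < message.toList.length →
        (growA ucs message.toList.length)[j]? = some (ucs.getD (j % ucs.length) "") := by
      intro j hj
      rw [growA_get ucs _ hune j hj]
      have hm : j % ucs.length < ucs.length := Nat.mod_lt _ hupos
      rw [List.getElem?_eq_getElem hm, List.getD_eq_getElem _ _ hm]
    have hperm := segments_perm lcs ucs (growA lcs message.toList.length)
      (growA ucs message.toList.length) message.toList.length hL hU message.toList 0 0 0
      (by simpa using List.countP_le_length (p := gLo) (l := message.toList))
      (by simpa using List.countP_le_length (p := gUp) (l := message.toList))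
    simp only [List.drop_zero] at hperm
    show assign_colours message lcs ucs = assign_colours_alt message lcs ucs
    unfold assign_colours assign_colours_alt
    simp only [catFold_eq, List.nil_append, PySem.List.foldl_append_singleton_eq_map]
    rw [PySem.List.sorted_eq_of_perm_of_pairwise_lt _ _ _ hperm.symm
      (trip_pairwise lcs ucs message.toList 0 0 0)]
    exact (altGo_eq_map_trip lcs ucs message.toList 0 0 0).symm
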